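-- pv_equiv track=rewrite | github.com/charon25/ProjectEuler | 64.py | cont_frac_period_len
-- ===== SOURCE A (Python) =====
-- from math import isqrt
--
-- def cont_frac_period_len(n):
--     a0 = isqrt(n)
--     if n == a0 * a0:
--         return 0
--
--     length = 1
--     alpha, beta = -a0, 1
--     alpha_beta = dict()
--
--     while not (alpha, beta) in alpha_beta:
--         ALPHA, BETA = alpha, beta
--         beta = (n - alpha * alpha) // beta
--         a = (-alpha + a0) // beta
--         alpha_beta[(ALPHA, BETA)] = length
--         alpha = -alpha - a * beta
--         length += 1
--
--     return length - alpha_beta[(alpha, beta)]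
-- ===== SOURCE B (Python) =====
-- from math import isqrt
--
-- def cont_frac_period_len(n):
--     # Pure periodicity of the continued fraction of sqrt(n): iterate the
--     # reduced-surd step on (m, d) from (a0, 1) and count steps until the
--     # state first returns to (a0, 1). O(1) memory, no dict of visited states.
--     a0 = isqrt(n)
--     if a0 * a0 == n:
--         return 0
--     m, d, k = a0, 1, 0
--     while True:
--         d = (n - m * m) // d
--         m = ((a0 + m) // d) * d - m
--         k += 1
--         if m == a0 and d == 1:
--             return k
-- ===== Notes on version B (the rewrite author's own statement) =====
-- stated objective: simpler
-- what changed: A stores every visited (alpha,beta) state in a dict and stops at the first repeated state, returning length minus its recorded index; B keeps only the three integers m,d,k of the standard reduced-surd recurrence and stops when the state first returns to the initial one (a0,1), which by pure periodicity of sqrt(n)'s continued fraction is exactly the first repeat, so it needs no dict at all (O(1) memory).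
import Mathlib
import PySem

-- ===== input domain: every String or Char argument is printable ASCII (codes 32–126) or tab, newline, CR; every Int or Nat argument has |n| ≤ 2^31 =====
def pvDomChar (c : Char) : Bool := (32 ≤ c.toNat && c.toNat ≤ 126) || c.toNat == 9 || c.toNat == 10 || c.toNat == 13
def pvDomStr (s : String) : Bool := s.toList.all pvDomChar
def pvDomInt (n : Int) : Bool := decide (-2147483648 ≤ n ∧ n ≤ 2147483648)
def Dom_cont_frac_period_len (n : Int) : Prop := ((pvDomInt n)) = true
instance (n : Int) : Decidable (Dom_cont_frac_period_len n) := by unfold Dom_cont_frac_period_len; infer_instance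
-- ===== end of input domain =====

-- B replaces A's dict of all visited (alpha,beta) states by the O(1)-memory reduced-surd
-- recurrence on (m,d) that stops when the state first returns to the start (a0,1) (simpler).

-- ===== PORT A =====
-- the while loop of A as fuel recursion (the fuel is an upper bound never reached on 0 ≤ n;
-- on exhaustion it returns 0, a value A never produces by this path)
def cfpGoA (n a0 : Int) : Nat → PySem.Dict (Int × Int) Int → Int → Int → Int → Int
  | 0, _, _, _, _ => 0
  | fuel + 1, ab, alpha, beta, length =>
    match ab.get? (alpha, beta) with
    | some v => length - v          -- loop guard fails: return length - alpha_beta[(alpha, beta)]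
    | none =>
      let beta' := PySem.Int.floordiv (n - alpha * alpha) beta
      let a := PySem.Int.floordiv (-alpha + a0) beta'
      let ab' := ab.insert (alpha, beta) length
      cfpGoA n a0 fuel ab' (-alpha - a * beta') beta' (length + 1)

def cont_frac_period_len (n : Int) : Int :=
  let a0 : Int := (Nat.sqrt n.toNat : Int)   -- math.isqrt(n): exact for 0 ≤ n (Pre_)
  if n = a0 * a0 then 0
  else cfpGoA n a0 (4 * (n.toNat + 2) * (n.toNat + 2) + 1) PySem.Dict.empty (-a0) 1 1

-- ===== PORT B =====
-- B's while loop: only (m, d, k), stop when (m, d) returns to (a0, 1)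
def cfpGoB (n a0 : Int) : Nat → Int → Int → Int → Int
  | 0, _, _, _ => 0
  | fuel + 1, m, d, k =>
    let d' := PySem.Int.floordiv (n - m * m) d
    let m' := PySem.Int.floordiv (a0 + m) d' * d' - m
    if m' = a0 ∧ d' = 1 then k + 1
    else cfpGoB n a0 fuel m' d' (k + 1)

def cont_frac_period_len_alt (n : Int) : Int :=
  let a0 : Int := (Nat.sqrt n.toNat : Int)   -- math.isqrt(n): exact for 0 ≤ n (Pre_)
  if a0 * a0 = n then 0
  else cfpGoB n a0 (4 * (n.toNat + 2) * (n.toNat + 2)) a0 1 0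

-- ===== PRECONDITION & SPEC =====
-- math.isqrt raises ValueError on negative input, so A raises there
def Pre_cont_frac_period_len (n : Int) : Prop := 0 ≤ n
instance (n : Int) : Decidable (Pre_cont_frac_period_len n) := by unfold Pre_cont_frac_period_len; infer_instance
def pvWitness_cont_frac_period_len : Int := 7

def Spec_cont_frac_period_len (n : Int) (out : Int) : Prop := out = cont_frac_period_len_alt n
instance (n : Int) (out : Int) : Decidable (Spec_cont_frac_period_len n out) := by unfold Spec_cont_frac_period_len; infer_instance

-- ===== CLAIM (what is proved, stated in full; the proofs are below) =====
def Claim_equal_cont_frac_period_len : Prop := ∀ (n : Int), Dom_cont_frac_period_len n → Pre_cont_frac_period_len n → Spec_cont_frac_period_len n (cont_frac_period_len n)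

-- ===== LEMMAS AND PROOFS =====

-- the common step on B's coordinates: (m, d) ↦ (m', d')
def cfpD (n : Int) (s : Int × Int) : Int := PySem.Int.floordiv (n - s.1 * s.1) s.2
def cfpStep (n a0 : Int) (s : Int × Int) : Int × Int :=
  (PySem.Int.floordiv (a0 + s.1) (cfpD n s) * cfpD n s - s.1, cfpD n s)

-- invariant: reduced surd states
def cfpJ (n a0 : Int) (s : Int × Int) : Prop :=
  1 ≤ s.1 ∧ s.1 ≤ a0 ∧ 1 ≤ s.2 ∧ s.2 ∣ (n - s.1 * s.1) ∧ a0 < s.2 + s.1 ∧ s.2 ≤ a0 + s.1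

-- the state sequence both loops traverse
def cfpSeq (n a0 : Int) : Nat → Int × Int
  | 0 => (a0, 1)
  | t + 1 => cfpStep n a0 (cfpSeq n a0 t)

-- A's dict key at step i and A's dict after t loop iterations
def cfpKey (n a0 : Int) (i : Nat) : Int × Int := (-(cfpSeq n a0 i).1, (cfpSeq n a0 i).2)
def cfpDict (n a0 : Int) : Nat → PySem.Dict (Int × Int) Int
  | 0 => PySem.Dict.empty
  | t + 1 => (cfpDict n a0 t).insert (cfpKey n a0 t) ((t : Int) + 1)

-- core arithmetic facts of one step from a J-state
lemma cfp_step_facts (n a0 : Int) (ha1 : 1 ≤ a0) (hlt : a0 * a0 < n)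
    (hub : n < (a0 + 1) * (a0 + 1)) (s : Int × Int) (hJ : cfpJ n a0 s) :
    ∃ q r : Int,
      0 ≤ r ∧ r < cfpD n s ∧ cfpD n s * q + r = a0 + s.1 ∧ 1 ≤ q ∧
      (cfpStep n a0 s).1 = a0 - r ∧ s.1 + (cfpStep n a0 s).1 = cfpD n s * q ∧
      cfpD n s * s.2 = n - s.1 * s.1 ∧ 0 < cfpD n s ∧ cfpJ n a0 (cfpStep n a0 s) := by
  obtain ⟨h1, h2, h3, h4, h5, h6⟩ := hJ
  obtain ⟨m, d⟩ := s
  simp only at h1 h2 h3 h4 h5 h6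
  have hdpos : (0:Int) < d := by omega
  have hD : 0 < n - m * m := by nlinarith
  have hfd : cfpD n (m, d) = (n - m * m) / d := PySem.Int.floordiv_eq_ediv_of_pos hdpos
  have hdd : cfpD n (m, d) * d = n - m * m := by rw [hfd]; exact Int.ediv_mul_cancel h4
  set D : Int := cfpD n (m, d) with hDdef
  have hd'pos : 0 < D := by nlinarith
  have hub' : D ≤ a0 + m := by nlinarith [mul_le_mul_of_nonneg_left (show a0 + 1 - m ≤ d by omega) (le_of_lt hd'pos)]
  have hfa : PySem.Int.floordiv (a0 + m) D = (a0 + m) / D := PySem.Int.floordiv_eq_ediv_of_pos hd'pos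
  set q : Int := (a0 + m) / D with hqdef
  set r : Int := (a0 + m) % D with hrdef
  have hq : D * q + r = a0 + m := Int.mul_ediv_add_emod _ _
  have hr0 : 0 ≤ r := Int.emod_nonneg _ (ne_of_gt hd'pos)
  have hr1 : r < D := Int.emod_lt_of_pos _ hd'pos
  have hq1 : 1 ≤ q := by nlinarith
  have hstep1 : (cfpStep n a0 (m, d)).1 = q * D - m := by
    simp only [cfpStep, ← hDdef, hfa]
  have hstep2 : (cfpStep n a0 (m, d)).2 = D := rfl
  have hm' : (cfpStep n a0 (m, d)).1 = a0 - r := by rw [hstep1]; linarith [mul_comm q D]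
  refine ⟨q, r, hr0, hr1, hq, hq1, hm', ?_, hdd, hd'pos, ?_⟩
  · rw [hstep1]; ring
  · refine ⟨?_, ?_, ?_, ?_, ?_, ?_⟩
    · rw [hstep1]
      rcases le_or_gt D a0 with hc | hc
      · nlinarith [mul_comm q D]
      · nlinarith [mul_le_mul_of_nonneg_right (show (1:Int) ≤ q from hq1) (le_of_lt hd'pos)]
    · rw [hstep1]; nlinarith [mul_comm q D]
    · rw [hstep2]; exact hd'pos
    · rw [hstep1, hstep2]
      exact ⟨d + 2 * q * m - q * q * D, by linear_combination -hdd⟩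
    · rw [hstep1, hstep2]; nlinarith [mul_comm q D]
    · rw [hstep1, hstep2]
      nlinarith [mul_le_mul_of_nonneg_right (show (1:Int) ≤ q from hq1) (le_of_lt hd'pos)]

lemma cfp_J_seq (n a0 : Int) (ha1 : 1 ≤ a0) (hlt : a0 * a0 < n)
    (hub : n < (a0 + 1) * (a0 + 1)) : ∀ t, cfpJ n a0 (cfpSeq n a0 t) := by
  intro t
  induction t with
  | zero =>
    exact ⟨ha1, le_refl a0, le_refl 1, one_dvd _, (by omega : a0 < 1 + a0),
      (by omega : (1:Int) ≤ a0 + a0)⟩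
  | succ t ih =>
    obtain ⟨q, r, _, _, _, _, _, _, _, _, hJ⟩ := cfp_step_facts n a0 ha1 hlt hub _ ih
    exact hJ

-- the step is injective on J-states
set_option maxHeartbeats 1000000 in
lemma cfp_inj (n a0 : Int) (ha1 : 1 ≤ a0) (hlt : a0 * a0 < n)
    (hub : n < (a0 + 1) * (a0 + 1)) (s1 s2 : Int × Int)
    (hJ1 : cfpJ n a0 s1) (hJ2 : cfpJ n a0 s2)
    (h : cfpStep n a0 s1 = cfpStep n a0 s2) : s1 = s2 := by
  obtain ⟨q1, r1, hr01, hr11, hq1, hq11, hm1, hsum1, hdd1, hpos1, _⟩ :=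
    cfp_step_facts n a0 ha1 hlt hub s1 hJ1
  obtain ⟨q2, r2, hr02, hr12, hq2, hq12, hm2, hsum2, hdd2, hpos2, _⟩ :=
    cfp_step_facts n a0 ha1 hlt hub s2 hJ2
  have hD : cfpD n s2 = cfpD n s1 := by
    have e1 : (cfpStep n a0 s1).2 = cfpD n s1 := rfl
    have e2 : (cfpStep n a0 s2).2 = cfpD n s2 := rfl
    rw [← e1, ← e2, h]
  rw [hD] at hr12 hq2 hsum2 hdd2 hpos2
  generalize hDg : cfpD n s1 = D at hr11 hq1 hsum1 hdd1 hpos1 hr12 hq2 hsum2 hdd2 hpos2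
  have hm : (cfpStep n a0 s1).1 = (cfpStep n a0 s2).1 := by rw [h]
  have hr : r1 = r2 := by
    have e := hm; rw [hm1, hm2] at e; omega
  -- m1 - m2 = D * (q1 - q2)
  have hdiff : s1.1 - s2.1 = D * (q1 - q2) := by
    linear_combination hsum1 - hsum2 - hm
  obtain ⟨j11, j12, j13, j14, j15, j16⟩ := hJ1
  obtain ⟨j21, j22, j23, j24, j25, j26⟩ := hJ2
  -- s2.1 - s1.1 < D  and  s1.1 - s2.1 < D
  have key : ∀ (a b da db : Int), 1 ≤ a → a ≤ a0 → 1 ≤ b → b ≤ a0 →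
      a0 < da + a → db ≤ a0 + b → D * da = n - a * a → D * db = n - b * b → a - b < D := by
    intro a b da db ka1 ka2 kb1 kb2 kred kub kda kdb
    by_contra hcon
    push Not at hcon
    nlinarith [mul_lt_mul_of_pos_left kred hpos1, mul_le_mul_of_nonneg_left kub (le_of_lt hpos1),
      mul_le_mul_of_nonneg_right hcon (show (0:Int) ≤ a + b by omega)]
  have hb1 : s1.1 - s2.1 < D := by
    exact key s1.1 s2.1 s1.2 s2.2 j11 j12 j21 j22 j15 j26 (by linarith [hdd1, mul_comm D s1.2]) (by linarith [hdd2, mul_comm D s2.2])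
  have hb2 : s2.1 - s1.1 < D := by
    exact key s2.1 s1.1 s2.2 s1.2 j21 j22 j11 j12 j25 j16 (by linarith [hdd2, mul_comm D s2.2]) (by linarith [hdd1, mul_comm D s1.2])
  have hqq : q1 = q2 := by
    rcases lt_trichotomy q1 q2 with hc | hc | hc
    · exfalso
      have h1' := mul_le_mul_of_nonneg_left (show (1:Int) ≤ q2 - q1 by omega) (le_of_lt hpos1)
      rw [mul_one] at h1'
      have e : s2.1 - s1.1 = D * (q2 - q1) := by linear_combination -hdiff
      linarith [hb2]
    · exact hc
    · exfalso
      have h1' := mul_le_mul_of_nonneg_left (show (1:Int) ≤ q1 - q2 by omega) (le_of_lt hpos1)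
      rw [mul_one] at h1'
      linarith [hb1, hdiff]
  have hmm : s1.1 = s2.1 := by rw [hqq] at hdiff; omega
  have hdd : s1.2 = s2.2 := by
    rw [hmm] at hdd1
    have : D * s1.2 = D * s2.2 := by rw [hdd1, hdd2]
    exact mul_left_cancel₀ (ne_of_gt hpos1) this
  exact Prod.ext hmm hdd

lemma cfp_key_inj (n a0 : Int) (i j : Nat) (h : cfpKey n a0 i = cfpKey n a0 j) :
    cfpSeq n a0 i = cfpSeq n a0 j := by
  unfold cfpKey at h
  injection h with h1 h2
  exact Prod.ext (by omega) h2

-- a state distinct from the whole prefix: dict lookups miss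
lemma cfp_dict_none (n a0 : Int) (t : Nat) (x : Int × Int)
    (h : ∀ i, i < t → x ≠ cfpKey n a0 i) : (cfpDict n a0 t).get? x = none := by
  induction t with
  | zero => exact PySem.Dict.get?_empty x
  | succ t ih =>
    have e : cfpDict n a0 (t + 1) = (cfpDict n a0 t).insert (cfpKey n a0 t) ((t : Int) + 1) := rfl
    rw [e, PySem.Dict.get?_insert_of_ne (cfpDict n a0 t) ((t : Int) + 1) (h t (Nat.lt_succ_self t))]
    exact ih (fun i hi => h i (Nat.lt_succ_of_lt hi))

-- the initial key keeps value 1 while later keys differ from it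
lemma cfp_dict_zero (n a0 : Int) (t : Nat) (h1 : 1 ≤ t)
    (h : ∀ j, 0 < j → j < t → cfpKey n a0 j ≠ cfpKey n a0 0) :
    (cfpDict n a0 t).get? (cfpKey n a0 0) = some 1 := by
  induction t with
  | zero => omega
  | succ t ih =>
    rcases Nat.eq_zero_or_pos t with h0 | h0
    · subst h0
      show ((PySem.Dict.empty).insert (cfpKey n a0 0) ((0 : Int) + 1)).get? (cfpKey n a0 0) = some 1
      rw [PySem.Dict.get?_insert_self]
      norm_num
    · have e : cfpDict n a0 (t + 1) = (cfpDict n a0 t).insert (cfpKey n a0 t) ((t : Int) + 1) := rfl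
      rw [e, PySem.Dict.get?_insert_of_ne (cfpDict n a0 t) ((t : Int) + 1)
        (Ne.symm (h t h0 (Nat.lt_succ_self t)))]
      exact ih h0 (fun j hj0 hjt => h j hj0 (Nat.lt_succ_of_lt hjt))

-- the successor of a distinct prefix repeats only at the start
lemma cfp_fresh (n a0 : Int) (ha1 : 1 ≤ a0) (hlt : a0 * a0 < n)
    (hub : n < (a0 + 1) * (a0 + 1)) (t : Nat)
    (hdist : ∀ i j, i ≤ t → j ≤ t → cfpSeq n a0 i = cfpSeq n a0 j → i = j)
    (hne : cfpSeq n a0 (t + 1) ≠ cfpSeq n a0 0) :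
    ∀ i, i ≤ t → cfpSeq n a0 (t + 1) ≠ cfpSeq n a0 i := by
  intro i hi he
  rcases Nat.eq_zero_or_pos i with h0 | h0
  · exact hne (h0 ▸ he)
  · obtain ⟨j, rfl⟩ : ∃ j, i = j + 1 := ⟨i - 1, by omega⟩
    have hJ := cfp_J_seq n a0 ha1 hlt hub
    have : cfpSeq n a0 t = cfpSeq n a0 j :=
      cfp_inj n a0 ha1 hlt hub _ _ (hJ t) (hJ j) he
    have := hdist t j (le_refl t) (by omega) this
    omega

-- the simulation: A's loop head at state t+1 computes what B's loop resumed at state t computes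
lemma cfp_goB_succ (n a0 : Int) (f : Nat) (t : Nat) :
    cfpGoB n a0 (f + 1) (cfpSeq n a0 t).1 (cfpSeq n a0 t).2 (t : Int)
      = if (cfpSeq n a0 (t + 1)).1 = a0 ∧ (cfpSeq n a0 (t + 1)).2 = 1 then (t : Int) + 1
        else cfpGoB n a0 f (cfpSeq n a0 (t + 1)).1 (cfpSeq n a0 (t + 1)).2 ((t : Int) + 1) := rfl

lemma cfp_goA_succ (n a0 : Int) (f : Nat) (t : Nat) :
    cfpGoA n a0 (f + 1) (cfpDict n a0 (t + 1)) (-(cfpSeq n a0 (t + 1)).1)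
        ((cfpSeq n a0 (t + 1)).2) ((t : Int) + 2)
      = match (cfpDict n a0 (t + 1)).get? (cfpKey n a0 (t + 1)) with
        | some v => ((t : Int) + 2) - v
        | none => cfpGoA n a0 f ((cfpDict n a0 (t + 1)).insert (cfpKey n a0 (t + 1)) ((t : Int) + 2))
            (-(cfpSeq n a0 (t + 2)).1) ((cfpSeq n a0 (t + 2)).2) ((t : Int) + 3) := by
  simp only [cfpGoA, cfpKey]
  rcases hg : (cfpDict n a0 (t + 1)).get? (-(cfpSeq n a0 (t + 1)).1, (cfpSeq n a0 (t + 1)).2)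
    with _ | v
  · have e2 : cfpSeq n a0 (t + 2) = cfpStep n a0 (cfpSeq n a0 (t + 1)) := rfl
    rw [e2]
    simp only [cfpStep, cfpD, neg_mul_neg, neg_neg, neg_sub]
    rw [add_comm ((cfpSeq n a0 (t + 1)).1) a0]
    congr 1
  · rfl

lemma cfp_sim (n a0 : Int) (ha1 : 1 ≤ a0) (hlt : a0 * a0 < n)
    (hub : n < (a0 + 1) * (a0 + 1)) :
    ∀ (f t : Nat),
      (∀ i j, i ≤ t → j ≤ t → cfpSeq n a0 i = cfpSeq n a0 j → i = j) →
      cfpGoA n a0 (f + 1) (cfpDict n a0 (t + 1)) (-(cfpSeq n a0 (t + 1)).1)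
          ((cfpSeq n a0 (t + 1)).2) ((t : Int) + 2)
        = cfpGoB n a0 (f + 1) ((cfpSeq n a0 t).1) ((cfpSeq n a0 t).2) (t : Int) := by
  intro f
  induction f with
  | zero =>
    intro t hdist
    rw [cfp_goA_succ, cfp_goB_succ]
    by_cases hstop : cfpSeq n a0 (t + 1) = cfpSeq n a0 0
    · have hget : (cfpDict n a0 (t + 1)).get? (cfpKey n a0 (t + 1)) = some 1 := by
        have hkey : cfpKey n a0 (t + 1) = cfpKey n a0 0 := by unfold cfpKey; rw [hstop]
        rw [hkey]
        refine cfp_dict_zero n a0 (t + 1) (by omega) (fun j hj0 hjt e => ?_)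
        have := hdist j 0 (by omega) (by omega) (cfp_key_inj n a0 j 0 e)
        omega
      rw [hget]
      have hc1 : (cfpSeq n a0 (t + 1)).1 = a0 := by rw [hstop]; rfl
      have hc2 : (cfpSeq n a0 (t + 1)).2 = 1 := by rw [hstop]; rfl
      rw [if_pos ⟨hc1, hc2⟩]
      ring
    · have hget : (cfpDict n a0 (t + 1)).get? (cfpKey n a0 (t + 1)) = none := by
        refine cfp_dict_none n a0 (t + 1) _ (fun i hi e => ?_)
        exact cfp_fresh n a0 ha1 hlt hub t hdist hstop i (by omega) (cfp_key_inj n a0 (t + 1) i e)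
      rw [hget]
      rw [if_neg (fun hc => hstop (Prod.ext hc.1 hc.2))]
      rfl
  | succ f ih =>
    intro t hdist
    rw [cfp_goA_succ, cfp_goB_succ]
    by_cases hstop : cfpSeq n a0 (t + 1) = cfpSeq n a0 0
    · have hget : (cfpDict n a0 (t + 1)).get? (cfpKey n a0 (t + 1)) = some 1 := by
        have hkey : cfpKey n a0 (t + 1) = cfpKey n a0 0 := by unfold cfpKey; rw [hstop]
        rw [hkey]
        refine cfp_dict_zero n a0 (t + 1) (by omega) (fun j hj0 hjt e => ?_)
        have := hdist j 0 (by omega) (by omega) (cfp_key_inj n a0 j 0 e)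
        omega
      rw [hget]
      have hc1 : (cfpSeq n a0 (t + 1)).1 = a0 := by rw [hstop]; rfl
      have hc2 : (cfpSeq n a0 (t + 1)).2 = 1 := by rw [hstop]; rfl
      rw [if_pos ⟨hc1, hc2⟩]
      ring
    · have hfresh := cfp_fresh n a0 ha1 hlt hub t hdist hstop
      have hget : (cfpDict n a0 (t + 1)).get? (cfpKey n a0 (t + 1)) = none := by
        refine cfp_dict_none n a0 (t + 1) _ (fun i hi e => ?_)
        exact hfresh i (by omega) (cfp_key_inj n a0 (t + 1) i e)
      rw [hget]
      rw [if_neg (fun hc => hstop (Prod.ext hc.1 hc.2))]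
      have hdict : (cfpDict n a0 (t + 1)).insert (cfpKey n a0 (t + 1)) ((t : Int) + 2)
          = cfpDict n a0 (t + 2) := by
        have e : cfpDict n a0 (t + 2)
            = (cfpDict n a0 (t + 1)).insert (cfpKey n a0 (t + 1)) (((t + 1 : Nat) : Int) + 1) := rfl
        rw [e]
        congr 1
      have hdist' : ∀ i j, i ≤ t + 1 → j ≤ t + 1 → cfpSeq n a0 i = cfpSeq n a0 j → i = j := by
        intro i j hi hj e
        rcases Nat.lt_or_ge i (t + 1) with hi' | hi' <;> rcases Nat.lt_or_ge j (t + 1) with hj' | hj'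
        · exact hdist i j (by omega) (by omega) e
        · have hj'' : j = t + 1 := by omega
          subst hj''
          exact absurd e.symm (hfresh i (by omega))
        · have hi'' : i = t + 1 := by omega
          subst hi''
          exact absurd e (hfresh j (by omega))
        · omega
      have := ih (t + 1) hdist'
      rw [hdict]
      have ec1 : ((t + 1 : Nat) : Int) + 2 = (t : Int) + 3 := by push_cast; ring
      have ec2 : ((t + 1 : Nat) : Int) = (t : Int) + 1 := by push_cast; ring
      rw [ec1, ec2] at this
      exact this

-- ===== VERDICT (by name: the statement is the Claim_ definition above) =====
theorem cont_frac_period_len_spec : Claim_equal_cont_frac_period_len := by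
  intro n _ hpre
  show cont_frac_period_len n = cont_frac_period_len_alt n
  have h0 : (0:Int) ≤ n := hpre
  simp only [cont_frac_period_len, cont_frac_period_len_alt]
  set A0 : Int := (Nat.sqrt n.toNat : Int) with hA0
  have hcast : ((n.toNat : Int)) = n := Int.toNat_of_nonneg h0
  have hle : A0 * A0 ≤ n := by
    have h := Nat.sqrt_le' n.toNat
    rw [pow_two] at h
    have h2 : ((Nat.sqrt n.toNat * Nat.sqrt n.toNat : Nat) : Int) ≤ ((n.toNat : Int)) :=
      Int.ofNat_le.mpr h
    push_cast at h2
    rw [hcast] at h2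
    exact h2
  have hub : n < (A0 + 1) * (A0 + 1) := by
    have h := Nat.lt_succ_sqrt' n.toNat
    rw [pow_two] at h
    have h2 : ((n.toNat : Int)) < (((Nat.sqrt n.toNat).succ * (Nat.sqrt n.toNat).succ : Nat) : Int) :=
      Int.ofNat_lt.mpr h
    push_cast at h2
    rw [hcast] at h2
    exact h2
  by_cases hsq : n = A0 * A0
  · rw [if_pos hsq, if_pos hsq.symm]
  · rw [if_neg hsq, if_neg (fun h => hsq h.symm)]
    have hlt : A0 * A0 < n := lt_of_le_of_ne hle (fun e => hsq e.symm)
    have ha1 : 1 ≤ A0 := by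
      rcases Int.lt_or_le A0 1 with hc | hc
      · have hnn : (0:Int) ≤ A0 := Int.natCast_nonneg _
        have h0' : A0 = 0 := by omega
        rw [h0'] at hlt hub
        norm_num at hlt hub
        omega
      · exact hc
    set F : Nat := 4 * (n.toNat + 2) * (n.toNat + 2) with hF
    have hFpos : 0 < F := by positivity
    obtain ⟨f, hf⟩ : ∃ f, F = f + 1 := ⟨F - 1, by omega⟩
    have step0 : cfpGoA n A0 (F + 1) PySem.Dict.empty (-A0) 1 1
        = cfpGoA n A0 F (cfpDict n A0 1) (-(cfpSeq n A0 1).1) ((cfpSeq n A0 1).2) 2 := by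
      simp only [cfpGoA]
      rw [PySem.Dict.get?_empty]
      simp only [cfpSeq, cfpStep, cfpD, cfpDict, cfpKey, neg_mul_neg, neg_neg, neg_sub]
      congr 1
    rw [step0, hf]
    exact cfp_sim n A0 ha1 hlt hub f 0 (by intro i j hi hj _; omega)
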